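-- pv_equiv track=rewrite | github.com/Tehtehteh/codewars | longest_consec.py | createL
-- ===== SOURCE A (Python) =====
-- def createL(strarr, k):
--     res = ''
--     if k > len(strarr):
--         return
--     else:
--         for i in range(k):
--             res += strarr[i]
--     yield res
--     yield from createL(strarr[1:], k)
-- ===== SOURCE B (Python) =====
-- def createL(strarr, k):
--     for start in range(len(strarr) - k + 1):
--         yield ''.join(strarr[start:start + k])
-- ===== Notes on version B (the rewrite author's own statement) =====
-- stated objective: faster
-- what changed: A's head-recursion, which copies strarr[1:] at every step and grows each window by repeated '+=', is replaced by a single iterative sliding-window loop over start indices that joins one slice per window; Pre_ excludes k <= 0, where the generator A never terminates (it yields '' forever).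
import Mathlib
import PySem

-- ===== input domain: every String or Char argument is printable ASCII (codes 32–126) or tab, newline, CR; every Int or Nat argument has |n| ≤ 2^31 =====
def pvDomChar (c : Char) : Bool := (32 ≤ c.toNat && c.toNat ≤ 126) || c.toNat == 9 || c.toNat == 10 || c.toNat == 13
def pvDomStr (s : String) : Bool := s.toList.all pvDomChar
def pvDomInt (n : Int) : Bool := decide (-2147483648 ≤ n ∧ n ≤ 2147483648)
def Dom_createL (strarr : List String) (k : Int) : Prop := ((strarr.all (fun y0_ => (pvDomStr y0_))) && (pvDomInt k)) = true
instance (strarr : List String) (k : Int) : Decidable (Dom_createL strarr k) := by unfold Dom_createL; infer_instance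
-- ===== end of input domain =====

-- B replaces A's head-recursion (which re-slices the list and grows each window by
-- repeated '+=') with a single sliding-window loop joining a slice per window;
-- equivalence is about the materialised generator (list of yielded strings).

-- ===== PORT A =====
-- A recurses: if k > len(strarr) stop, else yield strarr[0]+…+strarr[k-1], then recurse on strarr[1:].
-- For k ≤ 0 the Python generator never terminates (excluded by Pre_); the port's [] base case
-- in the empty-list branch is only reached there.
def createL (strarr : List String) (k : Int) : List String :=
  if k > (strarr.length : Int) then []
  else
    ((PySem.List.pyRange 0 k 1).foldl (fun res i => res ++ (PySem.List.pyGetD strarr i "")) "") ::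
    (match strarr with
     | [] => []
     | _ :: t => createL t k)

-- ===== PORT B =====
-- for start in range(len(strarr) - k + 1): yield ''.join(strarr[start:start+k])
def createL_alt (strarr : List String) (k : Int) : List String :=
  (PySem.List.pyRange 0 ((strarr.length : Int) - k + 1) 1).map
    (fun s => PySem.Str.join "" (PySem.List.slice strarr (some s) (some (s + k))))

-- ===== PRECONDITION & SPEC =====
-- Pre_ excludes k ≤ 0: there the Python generator A never terminates (it yields '' forever
-- once the list is exhausted), so A returns no finite list of values.
def Pre_createL (strarr : List String) (k : Int) : Prop := 1 ≤ k
instance (strarr : List String) (k : Int) : Decidable (Pre_createL strarr k) := by unfold Pre_createL; infer_instance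
def pvWitness_createL : List String × Int := (["a", "bc", "d"], 2)
def Spec_createL (strarr : List String) (k : Int) (out : List String) : Prop := out = createL_alt strarr k
instance (strarr : List String) (k : Int) (out : List String) : Decidable (Spec_createL strarr k out) := by unfold Spec_createL; infer_instance

-- ===== CLAIM (what is proved, stated in full; the proofs are below) =====
def Claim_equal_createL : Prop := ∀ (strarr : List String) (k : Int), Dom_createL strarr k → Pre_createL strarr k → Spec_createL strarr k (createL strarr k)

-- ===== LEMMAS AND PROOFS =====

lemma chars_join_nil_flatten (css : List (List Char)) : PySem.Chars.join [] css = css.flatten := by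
  induction css with
  | nil => rfl
  | cons c cs ih =>
    cases cs with
    | nil => simp [PySem.Chars.join, List.intercalate]
    | cons d ds =>
      simp only [List.flatten_cons, ← ih]
      simp [PySem.Chars.join, List.intercalate, List.intersperse]

lemma join_snoc (l : List String) (x : String) :
    PySem.Str.join "" (l ++ [x]) = PySem.Str.join "" l ++ x := by
  apply String.toList_inj.mp
  simp [pysem, chars_join_nil_flatten]

-- A's inner accumulation loop equals ''.join of the first kn elements.
lemma win_eq_join (xs : List String) (kn : Nat) (h : kn ≤ xs.length) :
    (PySem.List.pyRange 0 (kn : Int) 1).foldl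
      (fun res i => res ++ (PySem.List.pyGetD xs i "")) ""
    = PySem.Str.join "" (xs.take kn) := by
  rw [PySem.List.pyRange_zero_nat, List.foldl_map]
  induction kn with
  | zero => simp; rfl
  | succ n ih =>
    have hn : n < xs.length := by omega
    rw [List.range_succ, List.foldl_append, ih (by omega),
        List.take_succ_eq_append_getElem hn, join_snoc]
    simp [List.getD, hn, PySem.List.pyGetD_natCast]

lemma main_nat (xs : List String) (kn : Nat) (hk : 1 ≤ kn) :
    createL xs (kn : Int) = createL_alt xs (kn : Int) := by
  induction xs with
  | nil =>
    rw [createL_alt, PySem.List.pyRange_one_eq_nil (by simp only [List.length_nil, Nat.cast_zero]; omega),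
        List.map_nil, createL, if_pos (by simp only [List.length_nil, Nat.cast_zero]; omega)]
  | cons h t ih =>
    by_cases hle : kn ≤ t.length + 1
    · rw [createL, if_neg (by simp only [List.length_cons]; push_cast; omega)]
      conv_rhs => rw [createL_alt]
      rw [PySem.List.pyRange_one_cons
            (show (0:Int) < ((h::t).length : Int) - (kn:Int) + 1 by
              simp only [List.length_cons]; push_cast; omega)]
      rw [List.map_cons]
      congr 1
      · rw [win_eq_join (h::t) kn (by simpa using hle)]
        rw [zero_add, PySem.List.slice_zero_start, PySem.List.slice_to_natCast]
      · rw [ih, createL_alt]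
        simp only [zero_add, List.length_cons]
        rw [PySem.List.pyRange_one 1, PySem.List.pyRange_one 0]
        have hb : ((((t.length + 1 : Nat) : Int)) - (kn:Int) + 1 - 1).toNat
                = (((t.length : Int) - (kn:Int) + 1) - 0).toNat := by
          push_cast; omega
        rw [hb]
        rw [List.map_map, List.map_map]
        apply congrArg (fun f => List.map f _)
        funext j
        simp only [Function.comp]
        have e1 : (1 + (j:Int)) = (((j+1 : Nat)) : Int) := by push_cast; ring
        have e2 : (((j+1 : Nat):Int) + (kn:Int)) = (((j+1+kn : Nat)) : Int) := by push_cast; ring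
        have e3 : (0 + (j:Int)) = ((j : Nat) : Int) := by ring
        have e4 : (((j:Nat):Int) + (kn:Int)) = (((j+kn : Nat)) : Int) := by push_cast; ring
        rw [e1, e2, e3, e4, PySem.List.slice_natCast, PySem.List.slice_natCast]
        congr 1
        simp [List.drop_succ_cons]
    · rw [createL, if_pos (by simp only [List.length_cons]; push_cast; omega)]
      rw [createL_alt, PySem.List.pyRange_one_eq_nil (by simp only [List.length_cons]; push_cast; omega), List.map_nil]


-- ===== VERDICT (by name: the statement is the Claim_ definition above) =====
theorem createL_spec : Claim_equal_createL := by
  intro strarr k _ hpre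
  unfold Pre_createL at hpre
  unfold Spec_createL
  have hk : k = ((k.toNat : Nat) : Int) := (Int.toNat_of_nonneg (by omega)).symm
  rw [hk]
  exact main_nat strarr k.toNat (by omega)
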